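-- pv_equiv track=rewrite | github.com/fawaz-dabbaghieh/metadata_fixer | tools/merge_files.py | return_value
-- ===== SOURCE A (Python) =====
-- def return_value(key, lines):
--     value = "[[[Extra Key Introduced]]]"
--     for l in lines:
--         if key in l:
--             value = l[1]
--         else:
--             continue
--     return value
-- ===== SOURCE B (Python) =====
-- def return_value(key, lines):
--     for l in reversed(list(lines)):
--         if key in l:
--             return l[1]
--     return "[[[Extra Key Introduced]]]"
-- ===== Notes on version B (the rewrite author's own statement) =====
-- stated objective: alternative
-- what changed: B scans the materialized lines in reverse and returns at the first match, instead of A's forward scan that overwrites a sentinel on every match.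
import Mathlib
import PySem

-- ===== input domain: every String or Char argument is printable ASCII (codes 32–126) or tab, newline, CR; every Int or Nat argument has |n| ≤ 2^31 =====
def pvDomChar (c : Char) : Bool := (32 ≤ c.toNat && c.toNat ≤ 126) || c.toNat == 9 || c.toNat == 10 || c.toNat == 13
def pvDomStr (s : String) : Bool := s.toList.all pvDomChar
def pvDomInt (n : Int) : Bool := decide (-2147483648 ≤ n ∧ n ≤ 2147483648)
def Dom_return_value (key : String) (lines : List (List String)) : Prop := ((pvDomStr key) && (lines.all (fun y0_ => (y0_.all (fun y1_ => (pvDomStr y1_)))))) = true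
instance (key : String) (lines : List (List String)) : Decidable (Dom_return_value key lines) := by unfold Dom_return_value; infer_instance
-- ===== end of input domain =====

-- B scans the lines in reverse and returns at the first match (different decomposition; same return values on Pre_).
-- ===== PORT A =====
def return_value (key : String) (lines : List (List String)) : String :=
  lines.foldl
    (fun value l =>
      if l.contains key then (PySem.List.pyGet? l 1).getD value else value)
    "[[[Extra Key Introduced]]]"

-- ===== PORT B =====
def return_value_alt_go (key : String) : List (List String) → String
  | [] => "[[[Extra Key Introduced]]]"
  | l :: rest =>
    if l.contains key then (PySem.List.pyGet? l 1).getD ""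
    else return_value_alt_go key rest

def return_value_alt (key : String) (lines : List (List String)) : String :=
  return_value_alt_go key lines.reverse

-- ===== PRECONDITION & SPEC =====
-- Pre_ excludes exactly the inputs on which A raises IndexError: a line containing key but with fewer than 2 elements.
def Pre_return_value (key : String) (lines : List (List String)) : Prop :=
  ∀ l ∈ lines, l.contains key → 2 ≤ l.length
instance (key : String) (lines : List (List String)) : Decidable (Pre_return_value key lines) := by
  unfold Pre_return_value; infer_instance
def pvWitness_return_value : String × List (List String) := ("k", [["k", "v"], ["x"]])
def Spec_return_value (key : String) (lines : List (List String)) (out : String) : Prop := out = return_value_alt key lines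
instance (key : String) (lines : List (List String)) (out : String) : Decidable (Spec_return_value key lines out) := by unfold Spec_return_value; infer_instance

-- ===== CLAIM (what is proved, stated in full; the proofs are below) =====
def Claim_equal_return_value : Prop := ∀ (key : String) (lines : List (List String)), Dom_return_value key lines → Pre_return_value key lines → Spec_return_value key lines (return_value key lines)

-- ===== LEMMAS AND PROOFS =====
theorem go_eq_find (key : String) (xs : List (List String)) :
    return_value_alt_go key xs =
      match xs.find? (fun l => l.contains key) with
      | some l => (PySem.List.pyGet? l 1).getD ""
      | none => "[[[Extra Key Introduced]]]" := by
  induction xs with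
  | nil => rfl
  | cons l rest ih =>
    simp only [return_value_alt_go, List.find?]
    by_cases h : key ∈ l
    · simp [h]
    · simp [h, ih]

theorem foldl_eq_find (key : String) (xs : List (List String)) (v : String)
    (hpre : ∀ l ∈ xs, l.contains key → 2 ≤ l.length) :
    xs.foldl (fun value l => if l.contains key then (PySem.List.pyGet? l 1).getD value else value) v =
      match xs.reverse.find? (fun l => l.contains key) with
      | some l => (PySem.List.pyGet? l 1).getD ""
      | none => v := by
  induction xs generalizing v with
  | nil => rfl
  | cons l rest ih =>
    simp only [List.foldl_cons, List.reverse_cons]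
    rw [ih _ (fun l hl => hpre l (List.mem_cons_of_mem _ hl))]
    rcases hfind : rest.reverse.find? (fun l => l.contains key) with _ | l'
    · simp only [List.find?_append, hfind, Option.none_or, List.find?]
      by_cases h : key ∈ l
      · have hlen : 2 ≤ l.length := hpre l (List.mem_cons_self) (by simpa [List.contains_iff_mem])
        have hget : PySem.List.pyGet? l 1 = some l[1] := by
          apply PySem.List.pyGet?_ofNat
        simp [h, hget]
      · simp [h]
    · simp only [List.find?_append, hfind, Option.some_or]

-- ===== VERDICT (by name: the statement is the Claim_ definition above) =====
theorem return_value_spec : Claim_equal_return_value := by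
  intro key lines _hdom hpre
  unfold Spec_return_value return_value return_value_alt
  rw [go_eq_find, foldl_eq_find key lines _ hpre]
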